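-- pv_equiv track=rewrite | github.com/SirCocas/Ano3Semestre1 | iia/guioes_praticas/res/aula1/aula1.py | smallestListNumber
-- ===== SOURCE A (Python) =====
-- def smallestListNumber(list):
--     if(list == []):
--         return (None, [])
--     prev = smallestListNumber(list[1:])
--     if(prev[0] == None):
--         return(list[0], prev[1])
--     if(prev[0] > list[0]):
--         return (list[0], [prev[0]] + prev[1])
--     return (prev[0], [list[0]]+ prev[1])
-- ===== SOURCE B (Python) =====
-- def smallestListNumber(list):
--     # Single O(n) right-to-left pass with an append-only accumulator
--     # (A rebuilds lists via slicing/concatenation at every level: O(n^2)).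
--     m = None
--     rev = []
--     for x in reversed(list):
--         if m is None:
--             m = x
--         elif x < m:
--             rev.append(m)
--             m = x
--         else:
--             rev.append(x)
--     return (m, rev[::-1])
-- ===== Notes on version B (the rewrite author's own statement) =====
-- stated objective: faster
-- what changed: Replaces A's O(n^2) recursion (a tail slice and a list concatenation at every level) with one iterative right-to-left pass that keeps the running minimum and an append-only accumulator, reversed once at the end.
import Mathlib
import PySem

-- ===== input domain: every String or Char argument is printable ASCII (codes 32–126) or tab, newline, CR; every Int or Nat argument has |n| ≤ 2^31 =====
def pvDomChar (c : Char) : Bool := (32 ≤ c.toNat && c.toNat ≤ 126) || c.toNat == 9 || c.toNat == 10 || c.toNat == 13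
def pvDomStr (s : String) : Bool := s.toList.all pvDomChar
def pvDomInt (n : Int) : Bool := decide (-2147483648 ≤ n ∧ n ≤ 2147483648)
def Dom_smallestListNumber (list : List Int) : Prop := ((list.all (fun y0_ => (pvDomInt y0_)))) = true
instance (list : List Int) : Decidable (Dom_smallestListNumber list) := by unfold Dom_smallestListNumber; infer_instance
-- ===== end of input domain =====

-- B: one right-to-left pass with an append-only accumulator instead of A's slice-and-concat recursion (asymptotically faster; return value only, neither mutates its argument).

-- ===== PORT A =====
-- literal transliteration of A: structural recursion, cons-rebuilt result
def smallestListNumber (list : List Int) : Option Int × List Int :=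
  match list with
  | [] => (none, [])
  | x :: xs =>
    let prev := smallestListNumber xs
    match prev.1 with
    | none => (some x, prev.2)
    | some m => if m > x then (some x, m :: prev.2) else (some m, x :: prev.2)

-- ===== PORT B =====
-- transliteration of B: one foldl over reversed(list) with state (m, rev); rev[::-1] at the end
def pvStepB (s : Option Int × List Int) (x : Int) : Option Int × List Int :=
  match s with
  | (none, rev) => (some x, rev)
  | (some m, rev) => if x < m then (some x, rev ++ [m]) else (some m, rev ++ [x])

def smallestListNumber_alt (list : List Int) : Option Int × List Int :=
  let s := list.reverse.foldl pvStepB (none, [])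
  (s.1, s.2.reverse)

-- ===== PRECONDITION & SPEC =====
def Spec_smallestListNumber (list : List Int) (out : Option Int × List Int) : Prop := out = smallestListNumber_alt list
instance (list : List Int) (out : Option Int × List Int) : Decidable (Spec_smallestListNumber list out) := by unfold Spec_smallestListNumber; infer_instance

-- ===== CLAIM (what is proved, stated in full; the proofs are below) =====
def Claim_equal_smallestListNumber : Prop := ∀ (list : List Int), Dom_smallestListNumber list → Spec_smallestListNumber list (smallestListNumber list)

-- ===== LEMMAS AND PROOFS =====

-- ===== VERDICT (by name: the statement is the Claim_ definition above) =====
-- A equals the reversed-fold characterisation, by induction on the list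
theorem pvFoldB_eq (l : List Int) :
    smallestListNumber l =
      ((l.reverse.foldl pvStepB (none, [])).1,
       (l.reverse.foldl pvStepB (none, [])).2.reverse) := by
  induction l with
  | nil => simp [smallestListNumber]
  | cons x xs ih =>
    simp only [List.reverse_cons, List.foldl_append, List.foldl_cons, List.foldl_nil]
    rcases h : xs.reverse.foldl pvStepB (none, []) with ⟨m?, rev⟩
    rw [h] at ih
    cases m? with
    | none => simp [smallestListNumber, ih, pvStepB]
    | some m =>
      by_cases hx : x < m
      · simp [smallestListNumber, ih, pvStepB, hx]
      · simp [smallestListNumber, ih, pvStepB, hx]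

theorem smallestListNumber_spec : Claim_equal_smallestListNumber := by
  intro l _
  unfold Spec_smallestListNumber smallestListNumber_alt
  exact pvFoldB_eq l
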